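-- pv_equiv track=rewrite | github.com/Whitecki/ASD | Dynamiki/MIT/R3.Wafer Power.py | ale_duzo_kresek
-- ===== SOURCE A (Python) =====
-- def ale_duzo_kresek(T):
--     n = len(T)
--     #na idx pierwszym i drugim jest informacja, czy lewy i prawy koniec łuku są już połączone z jakąś kropką
--     dp = [[0 for _ in range(n)]for _ in range(n)]
--     for i in range(2,n): # długość łuku
--         for j in range(n): # miejsce od którego zaczynam łuk
--             dp[j%n][(j+i)%n] = dp[(j+1)%n][(j+i-1)%n]
--             if (T[i] == False and T[j] == True) or (T[j] == False and T[i] == True) and abs(j%n - i%n) > 1: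
--                 dp[j%n][(j+i)%n] += 1
--             # mniejszy łuk
--             for k in range(i):
--                 dp[j%n][(j + i) % n] = max(dp[j%n][(j+i)%n],dp[j%n][(j+k)%n] + dp[(j+1+k)%n][(j+i)%n])
--     return dp[0][n-1]
-- ===== SOURCE B (Python) =====
-- def ale_duzo_kresek(T):
--     # Memoized top-down recursion f(j, i) = value of A's dp[j % n][(j + i) % n];
--     # the table and triple nested loops are replaced by recursion on the arc length i.
--     n = len(T)
--     memo = {}
--     def f(j, i):
--         if i < 2:
--             return 0
--         jj = j % n
--         key = (jj, i)
--         if key in memo: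
--             return memo[key]
--         val = f(j + 1, i - 2)
--         if (T[i] == False and T[jj] == True) or (T[jj] == False and T[i] == True) and abs(jj - i % n) > 1:
--             val += 1
--         for k in range(i):
--             val = max(val, f(j, k) + f(j + 1 + k, i - 1 - k))
--         memo[key] = val
--         return val
--     return f(0, n - 1)
-- ===== Notes on version B (the rewrite author's own statement) =====
-- stated objective: alternative
-- what changed: Replaces A's bottom-up n×n table filled by three nested loops with a memoized top-down recursion f(j, i) on the arc length, computing only the dp entries reachable from dp[0][n-1] and keeping the source's condition and index arithmetic verbatim.
import Mathlib
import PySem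

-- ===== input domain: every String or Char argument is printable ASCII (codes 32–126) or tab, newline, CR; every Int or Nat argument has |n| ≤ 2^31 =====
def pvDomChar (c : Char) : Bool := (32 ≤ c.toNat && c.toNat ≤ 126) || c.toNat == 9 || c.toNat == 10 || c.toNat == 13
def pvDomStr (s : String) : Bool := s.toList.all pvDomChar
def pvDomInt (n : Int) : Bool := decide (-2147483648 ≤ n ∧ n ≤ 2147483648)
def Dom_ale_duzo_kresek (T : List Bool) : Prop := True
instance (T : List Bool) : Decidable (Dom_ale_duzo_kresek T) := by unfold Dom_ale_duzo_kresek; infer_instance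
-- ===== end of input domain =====

-- B replaces A's bottom-up n×n table and its triple nested loops by a memoized
-- top-down recursion on the arc length (objective: alternative decomposition).

-- ===== PORT A =====

-- A's n×n list-of-lists dp is modelled as a dictionary keyed by (row, column) with
-- default 0; every cell A ever reads or writes is addressed by in-range indices.

-- A's if-condition, verbatim (including the and/or precedence of the Python source)
def condA (T : List Bool) (n i j : Nat) : Bool :=
  ((T.getD i false == false) && (T.getD j false == true)) ||
  (((T.getD j false == false) && (T.getD i false == true)) &&
    decide (1 < (((j % n : Nat) : Int) - ((i % n : Nat) : Int)).natAbs))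

-- body of A's j-loop
def aInner (T : List Bool) (n i : Nat) (d : PySem.Dict (Nat × Nat) Int) (j : Nat) :
    PySem.Dict (Nat × Nat) Int :=
  let d1 := d.insert (j % n, (j + i) % n) (d.getD ((j + 1) % n, (j + i - 1) % n) 0)
  let d2 := if condA T n i j then
      d1.insert (j % n, (j + i) % n) (d1.getD (j % n, (j + i) % n) 0 + 1)
    else d1
  (List.range i).foldl (fun d k =>
    d.insert (j % n, (j + i) % n)
      (max (d.getD (j % n, (j + i) % n) 0)
           (d.getD (j % n, (j + k) % n) 0 + d.getD ((j + 1 + k) % n, (j + i) % n) 0))) d2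

def ale_duzo_kresek (T : List Bool) : Int :=
  let n := T.length
  let dp := (List.range' 2 (n - 2)).foldl
    (fun d i => (List.range n).foldl (aInner T n i) d) PySem.Dict.empty
  dp.getD (0, n - 1) 0

-- ===== PORT B =====

-- B's if-condition, verbatim from Source B (jj is already reduced mod n there)
def condB (T : List Bool) (n i jj : Nat) : Bool :=
  ((T.getD i false == false) && (T.getD jj false == true)) ||
  (((T.getD jj false == false) && (T.getD i false == true)) &&
    decide (1 < ((jj : Int) - ((i % n : Nat) : Int)).natAbs))

-- f(j, i) of Source B; the memo dict of Source B is a pure caching device, the value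
-- it caches is exactly this recursion on the arc length i
def bRec (T : List Bool) (n j i : Nat) : Int :=
  if i < 2 then 0
  else
    let jj := j % n
    let v0 := bRec T n (j + 1) (i - 2)
    let v1 := if condB T n i jj then v0 + 1 else v0
    (List.range i).attach.foldl
      (fun v k => max v (bRec T n j k.1 + bRec T n (j + 1 + k.1) (i - 1 - k.1))) v1
termination_by i
decreasing_by
  · omega
  · have := List.mem_range.mp k.2; omega
  · omega

def ale_duzo_kresek_alt (T : List Bool) : Int :=
  bRec T T.length 0 (T.length - 1)

-- ===== PRECONDITION & SPEC =====
-- Pre_ excludes only the empty list, on which A raises IndexError (dp[0][-1] on an empty dp).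
def Pre_ale_duzo_kresek (T : List Bool) : Prop := T ≠ []
instance (T : List Bool) : Decidable (Pre_ale_duzo_kresek T) := by
  unfold Pre_ale_duzo_kresek; infer_instance

def pvWitness_ale_duzo_kresek : List Bool := [true, false, true, true, false]

def Spec_ale_duzo_kresek (T : List Bool) (out : Int) : Prop := out = ale_duzo_kresek_alt T
instance (T : List Bool) (out : Int) : Decidable (Spec_ale_duzo_kresek T out) := by
  unfold Spec_ale_duzo_kresek; infer_instance

-- ===== CLAIM (what is proved, stated in full; the proofs are below) =====
def Claim_equal_ale_duzo_kresek : Prop :=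
  ∀ (T : List Bool), Dom_ale_duzo_kresek T → Pre_ale_duzo_kresek T →
    Spec_ale_duzo_kresek T (ale_duzo_kresek T)

-- ===== LEMMAS AND PROOFS =====

theorem bRec_eq (T : List Bool) (n j i : Nat) :
    bRec T n j i =
      if i < 2 then 0
      else
        let jj := j % n
        let v0 := bRec T n (j + 1) (i - 2)
        let v1 := if condB T n i jj then v0 + 1 else v0
        (List.range i).attach.foldl
          (fun v k => max v (bRec T n j k.1 + bRec T n (j + 1 + k.1) (i - 1 - k.1))) v1 := by
  rw [bRec]

-- arc length of the cell (a, b): the unique k < n with b = (a + k) % n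
def arcL (n a b : Nat) : Nat := (b + n - a) % n

theorem arcL_add (n a k : Nat) (ha : a < n) (hk : k < n) : arcL n a ((a + k) % n) = k := by
  unfold arcL
  rcases Nat.lt_or_ge (a + k) n with h | h
  · rw [Nat.mod_eq_of_lt h]
    have e : a + k + n - a = k + n := by omega
    rw [e, Nat.add_mod_right, Nat.mod_eq_of_lt hk]
  · have e1 : (a + k) % n = a + k - n := by
      rw [Nat.mod_eq_sub_mod h, Nat.mod_eq_of_lt (by omega)]
    have e2 : a + k - n + n - a = k := by omega
    rw [e1, e2, Nat.mod_eq_of_lt hk]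

theorem arcL_inv (n a b : Nat) (ha : a < n) (hb : b < n) : (a + arcL n a b) % n = b := by
  unfold arcL
  rcases Nat.lt_or_ge b a with h | h
  · have e1 : (b + n - a) % n = b + n - a := Nat.mod_eq_of_lt (by omega)
    rw [e1]
    have e2 : a + (b + n - a) = b + n := by omega
    rw [e2, Nat.add_mod_right, Nat.mod_eq_of_lt hb]
  · have e : b + n - a = b - a + n := by omega
    rw [e, Nat.add_mod_right]
    have e1 : (b - a) % n = b - a := Nat.mod_eq_of_lt (by omega)
    rw [e1]
    have e2 : a + (b - a) = b := by omega
    rw [e2, Nat.mod_eq_of_lt hb]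

theorem mod_add_inj (n a k1 k2 : Nat) (ha : a < n) (h1 : k1 < n) (h2 : k2 < n)
    (h : (a + k1) % n = (a + k2) % n) : k1 = k2 := by
  have := arcL_add n a k1 ha h1
  rw [h, arcL_add n a k2 ha h2] at this
  omega

-- Source B reduces j mod n before using it; the recursion value only depends on j % n
theorem bRec_mod (T : List Bool) (n : Nat) : ∀ (i j : Nat), bRec T n j i = bRec T n (j % n) i := by
  intro i
  induction i using Nat.strong_induction_on with
  | _ i IH =>
    intro j
    rw [bRec_eq T n j i, bRec_eq T n (j % n) i]
    by_cases h2 : i < 2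
    · rw [if_pos h2, if_pos h2]
    · rw [if_neg h2, if_neg h2]
      simp only
      have hjj : j % n % n = j % n := Nat.mod_mod_of_dvd j (dvd_refl n)
      rw [hjj]
      have hv0 : bRec T n (j + 1) (i - 2) = bRec T n (j % n + 1) (i - 2) := by
        rw [IH (i - 2) (by omega) (j + 1), IH (i - 2) (by omega) (j % n + 1), Nat.mod_add_mod]
      rw [hv0]
      apply List.foldl_ext
      intro v k hmem
      have hk : k.1 < i := List.mem_range.mp k.2
      have e1 : bRec T n j k.1 = bRec T n (j % n) k.1 := IH k.1 hk j
      have e2 : bRec T n (j + 1 + k.1) (i - 1 - k.1) = bRec T n (j % n + 1 + k.1) (i - 1 - k.1) := by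
        rw [IH (i - 1 - k.1) (by omega) (j + 1 + k.1), IH (i - 1 - k.1) (by omega) (j % n + 1 + k.1)]
        have e3 : j % n + 1 + k.1 = j % n + (1 + k.1) := by omega
        have e4 : j + (1 + k.1) = j + 1 + k.1 := by omega
        rw [e3, Nat.mod_add_mod, e4]
      rw [e1, e2]

-- the table invariant: after the lengths < m are done and, at length m, the starts < J
-- are done, each cell (a, b) holds the final value bRec of its arc, and 0 otherwise
def TInv (T : List Bool) (n m J : Nat) (d : PySem.Dict (Nat × Nat) Int) : Prop :=
  ∀ a b, a < n → b < n →
    d.getD (a, b) 0 =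
      if 2 ≤ arcL n a b ∧ (arcL n a b < m ∨ (arcL n a b = m ∧ a < J)) then
        bRec T n a (arcL n a b)
      else 0

theorem inv_read_lt (T : List Bool) (n m J : Nat) (d : PySem.Dict (Nat × Nat) Int)
    (hn : 0 < n) (hInv : TInv T n m J d) (a k : Nat) (ha : a < n) (hk : k < n) (hkm : k < m) :
    d.getD (a, (a + k) % n) 0 = bRec T n a k := by
  have hb : (a + k) % n < n := Nat.mod_lt _ hn
  rw [hInv a _ ha hb, arcL_add n a k ha hk]
  by_cases h2 : 2 ≤ k
  · rw [if_pos ⟨h2, Or.inl hkm⟩]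
  · rw [if_neg (by omega), bRec_eq, if_pos (by omega)]

-- the k-loop of A only rewrites the single cell (J, bc); folded into a max-accumulator
theorem kfold_getD (n J bc : Nat) (d : PySem.Dict (Nat × Nat) Int) (l : List Nat)
    (hne : ∀ k ∈ l, (J + k) % n ≠ bc ∧ (J + 1 + k) % n ≠ J) :
    ∀ (d' : PySem.Dict (Nat × Nat) Int) (w : Int),
      (∀ x y, d'.getD (x, y) 0 = if x = J ∧ y = bc then w else d.getD (x, y) 0) →
      ∀ x y,
        (l.foldl (fun dd k =>
            dd.insert (J, bc)
              (max (dd.getD (J, bc) 0)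
                   (dd.getD (J, (J + k) % n) 0 + dd.getD ((J + 1 + k) % n, bc) 0))) d').getD (x, y) 0
        = if x = J ∧ y = bc then
            l.foldl (fun v k =>
              max v (d.getD (J, (J + k) % n) 0 + d.getD ((J + 1 + k) % n, bc) 0)) w
          else d.getD (x, y) 0 := by
  induction l with
  | nil => intro d' w h x y; simpa using h x y
  | cons k l ih =>
    intro d' w h x y
    simp only [List.foldl_cons]
    have hk := hne k (List.mem_cons_self ..)
    have r1 : d'.getD (J, bc) 0 = w := by rw [h]; simp
    have r2 : d'.getD (J, (J + k) % n) 0 = d.getD (J, (J + k) % n) 0 := by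
      rw [h]; simp [hk.1]
    have r3 : d'.getD ((J + 1 + k) % n, bc) 0 = d.getD ((J + 1 + k) % n, bc) 0 := by
      rw [h]; simp [hk.2]
    apply ih (fun k hkl => hne k (List.mem_cons_of_mem _ hkl))
    intro x' y'
    rw [PySem.Dict.getD_insert, r1, r2, r3]
    by_cases hc : x' = J ∧ y' = bc
    · rw [if_pos (by simp [hc.1, hc.2]), if_pos hc]
    · rw [if_neg (by simpa [Prod.ext_iff] using hc), if_neg hc, h, if_neg hc]

-- the two verbatim conditions agree once j is reduced mod n
theorem condA_eq_condB (T : List Bool) (n m J : Nat) (hJm : J % n = J) :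
    condA T n m J = condB T n m J := by
  unfold condA condB
  rw [hJm]

-- one step of A's j-loop finalises the cell of the arc starting at J with length m
theorem aInner_inv (T : List Bool) (n m J : Nat) (d : PySem.Dict (Nat × Nat) Int)
    (hn : 0 < n) (hm2 : 2 ≤ m) (hmn : m < n) (hJ : J < n) (hInv : TInv T n m J d) :
    TInv T n m (J + 1) (aInner T n m d J) := by
  have hJm : J % n = J := Nat.mod_eq_of_lt hJ
  have hbn : (J + m) % n < n := Nat.mod_lt _ hn
  -- the value A loads first is the finished sub-arc (J+1, m-2)
  have hv0 : d.getD ((J + 1) % n, (J + m - 1) % n) 0 = bRec T n (J + 1) (m - 2) := by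
    have e : (J + m - 1) % n = ((J + 1) % n + (m - 2)) % n := by
      rw [Nat.mod_add_mod]
      congr 1
      omega
    rw [e, inv_read_lt T n m J d hn hInv ((J + 1) % n) (m - 2) (Nat.mod_lt _ hn) (by omega) (by omega),
       bRec_mod T n (m - 2) (J + 1)]
  -- pointwise shape of the table after the two head assignments
  have hshape : ∀ x y,
      ((if condA T n m J then
          (d.insert (J, (J + m) % n) (d.getD ((J + 1) % n, (J + m - 1) % n) 0)).insert (J, (J + m) % n)
            ((d.insert (J, (J + m) % n) (d.getD ((J + 1) % n, (J + m - 1) % n) 0)).getD (J, (J + m) % n) 0 + 1)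
        else d.insert (J, (J + m) % n) (d.getD ((J + 1) % n, (J + m - 1) % n) 0))).getD (x, y) 0
      = if x = J ∧ y = (J + m) % n then
          (if condA T n m J then bRec T n (J + 1) (m - 2) + 1 else bRec T n (J + 1) (m - 2))
        else d.getD (x, y) 0 := by
    intro x y
    by_cases hc : condA T n m J
    · rw [if_pos hc, if_pos hc, PySem.Dict.getD_insert, PySem.Dict.getD_insert,
        PySem.Dict.getD_insert, if_pos rfl, hv0]
      by_cases hxy : x = J ∧ y = (J + m) % n
      · rw [if_pos (by simp [hxy.1, hxy.2]), if_pos hxy]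
      · rw [if_neg (by simpa [Prod.ext_iff] using hxy), if_neg (by simpa [Prod.ext_iff] using hxy),
          if_neg hxy]
    · rw [if_neg hc, if_neg hc, PySem.Dict.getD_insert, hv0]
      by_cases hxy : x = J ∧ y = (J + m) % n
      · rw [if_pos (by simp [hxy.1, hxy.2]), if_pos hxy]
      · rw [if_neg (by simpa [Prod.ext_iff] using hxy), if_neg hxy]
  have hne : ∀ k ∈ List.range m, (J + k) % n ≠ (J + m) % n ∧ (J + 1 + k) % n ≠ J := by
    intro k hkm'
    have hk : k < m := List.mem_range.mp hkm'
    constructor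
    · intro h
      have := mod_add_inj n J k m hJ (by omega) hmn h
      omega
    · intro h
      have e1 : (J + m) % n = ((J + 1 + k) % n + (m - 1 - k)) % n := by
        rw [Nat.mod_add_mod]
        congr 1
        omega
      rw [h] at e1
      have := mod_add_inj n J m (m - 1 - k) hJ hmn (by omega) e1
      omega
  have hmain := kfold_getD n J ((J + m) % n) d (List.range m) hne _ _ hshape
  -- the max-accumulator computes exactly bRec T n J m
  have hW : (List.range m).foldl (fun v k =>
        max v (d.getD (J, (J + k) % n) 0 + d.getD ((J + 1 + k) % n, (J + m) % n) 0))
        (if condA T n m J then bRec T n (J + 1) (m - 2) + 1 else bRec T n (J + 1) (m - 2))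
      = bRec T n J m := by
    rw [bRec_eq T n J m, if_neg (show ¬ m < 2 by omega)]
    simp only [hJm, condA_eq_condB T n m J hJm]
    rw [← List.foldl_attach]
    apply List.foldl_ext
    intro v k hmem
    have hk : k.1 < m := List.mem_range.mp k.2
    have r1 : d.getD (J, (J + k.1) % n) 0 = bRec T n J k.1 :=
      inv_read_lt T n m J d hn hInv J k.1 hJ (by omega) hk
    have r2 : d.getD ((J + 1 + k.1) % n, (J + m) % n) 0 = bRec T n (J + 1 + k.1) (m - 1 - k.1) := by
      have e : (J + m) % n = ((J + 1 + k.1) % n + (m - 1 - k.1)) % n := by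
        rw [Nat.mod_add_mod]
        congr 1
        omega
      rw [e, inv_read_lt T n m J d hn hInv ((J + 1 + k.1) % n) (m - 1 - k.1)
            (Nat.mod_lt _ hn) (by omega) (by omega),
        bRec_mod T n (m - 1 - k.1) (J + 1 + k.1)]
    rw [r1, r2]
  -- put the pieces together
  intro a b ha hb
  unfold aInner
  simp only [hJm]
  rw [hmain a b, hW]
  by_cases hab : a = J ∧ b = (J + m) % n
  · rw [if_pos hab, hab.1, hab.2, arcL_add n J m hJ hmn,
      if_pos ⟨hm2, Or.inr ⟨rfl, by omega⟩⟩]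
  · rw [if_neg hab, hInv a b ha hb]
    by_cases hL : arcL n a b = m ∧ a = J
    · exfalso
      have := arcL_inv n a b ha hb
      rw [hL.1, hL.2] at this
      exact hab ⟨hL.2, this.symm⟩
    · by_cases h2L : 2 ≤ arcL n a b ∧ (arcL n a b < m ∨ (arcL n a b = m ∧ a < J))
      · refine (if_pos h2L).trans (if_pos ?_).symm
        refine ⟨h2L.1, ?_⟩
        rcases h2L.2 with h | h
        · exact Or.inl h
        · exact Or.inr ⟨h.1, by omega⟩
      · rw [if_neg h2L, if_neg (by
          intro hcon
          apply h2L
          refine ⟨hcon.1, ?_⟩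
          rcases hcon.2 with h | h
          · exact Or.inl h
          · have haJ : a ≠ J := fun he => hL ⟨h.1, he⟩
            exact Or.inr ⟨h.1, by omega⟩)]

-- A's whole j-loop, start by start
theorem inner_fold (T : List Bool) (n m : Nat) (hn : 0 < n) (hm2 : 2 ≤ m) (hmn : m < n) :
    ∀ (c J : Nat) (d : PySem.Dict (Nat × Nat) Int), J + c ≤ n → TInv T n m J d →
      TInv T n m (J + c) ((List.range' J c).foldl (aInner T n m) d) := by
  intro c
  induction c with
  | zero => intro J d _ h; simpa using h
  | succ c ih =>
    intro J d hJc h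
    have e : List.range' J (c + 1) = J :: List.range' (J + 1) c := rfl
    rw [e, List.foldl_cons]
    have h1 := aInner_inv T n m J d hn hm2 hmn (by omega) h
    have h2 := ih (J + 1) _ (by omega) h1
    have e2 : J + 1 + c = J + (c + 1) := by omega
    rwa [e2] at h2

theorem inv_shift (T : List Bool) (n m : Nat) (d : PySem.Dict (Nat × Nat) Int)
    (h : TInv T n m n d) : TInv T n (m + 1) 0 d := by
  intro a b ha hb
  rw [h a b ha hb]
  refine if_congr ?_ rfl rfl
  omega

-- A's whole i-loop, length by length
theorem outer_fold (T : List Bool) (n : Nat) (hn : 0 < n) :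
    ∀ (c m : Nat) (d : PySem.Dict (Nat × Nat) Int), 2 ≤ m → m + c ≤ n → TInv T n m 0 d →
      TInv T n (m + c) 0 ((List.range' m c).foldl
        (fun d i => (List.range n).foldl (aInner T n i) d) d) := by
  intro c
  induction c with
  | zero => intro m d _ _ h; simpa using h
  | succ c ih =>
    intro m d hm2 hmc h
    have e : List.range' m (c + 1) = m :: List.range' (m + 1) c := rfl
    rw [e, List.foldl_cons]
    have h1 : TInv T n m n ((List.range n).foldl (aInner T n m) d) := by
      have h0 := inner_fold T n m hn hm2 (by omega) n 0 d (by omega) h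
      rw [List.range_eq_range']
      simpa using h0
    have h2 := ih (m + 1) _ (by omega) (by omega) (inv_shift T n m _ h1)
    have e2 : m + 1 + c = m + (c + 1) := by omega
    rwa [e2] at h2

-- ===== VERDICT (by name: the statement is the Claim_ definition above) =====
theorem ale_duzo_kresek_spec : Claim_equal_ale_duzo_kresek := by
  intro T _ hpre
  have hn : 0 < T.length := List.length_pos_of_ne_nil hpre
  unfold Spec_ale_duzo_kresek ale_duzo_kresek ale_duzo_kresek_alt
  show ((List.range' 2 (T.length - 2)).foldl
      (fun d i => (List.range T.length).foldl (aInner T T.length i) d)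
      PySem.Dict.empty).getD (0, T.length - 1) 0 = bRec T T.length 0 (T.length - 1)
  by_cases h3 : 3 ≤ T.length
  · have hbase : TInv T T.length 2 0 PySem.Dict.empty := by
      intro a b ha hb
      rw [PySem.Dict.getD_empty, if_neg (by omega)]
    have h := outer_fold T T.length hn (T.length - 2) 2 PySem.Dict.empty (by omega)
      (by omega) hbase
    have e : 2 + (T.length - 2) = T.length := by omega
    rw [e] at h
    rw [h 0 (T.length - 1) hn (by omega)]
    have eL : arcL T.length 0 (T.length - 1) = T.length - 1 := by
      unfold arcL
      have e2 : T.length - 1 + T.length - 0 = (T.length - 1) + T.length := by omega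
      rw [e2, Nat.add_mod_right, Nat.mod_eq_of_lt (by omega)]
    rw [eL, if_pos ⟨by omega, Or.inl (by omega)⟩]
  · have e : T.length - 2 = 0 := by omega
    rw [e]
    show (PySem.Dict.empty : PySem.Dict (Nat × Nat) Int).getD (0, T.length - 1) 0
      = bRec T T.length 0 (T.length - 1)
    rw [PySem.Dict.getD_empty, bRec_eq, if_pos (by omega)]
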